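-- pv_equiv track=rewrite | github.com/mstretavsky/AOC | 2023/Day11_B.py | GetCrossedExpandedLines
-- ===== SOURCE A (Python) =====
-- def GetCrossedExpandedLines(pointA:(), pointB:(), insertedrow:[], insertedcolumns:[]):
--     crossedexpandedlines:int = 0
--     rowrange = [pointA[0], pointB[0]]
--     columnrange = [pointA[1], pointB[1]]
--     rowrange.sort()
--     columnrange.sort()
--     for v in range(rowrange[0], rowrange[1]):
--         if any(True for i in insertedrow if i == v):
--             crossedexpandedlines += 1
--     for v in range(columnrange[0], columnrange[1]):
--         if any(True for i in insertedcolumns if i == v):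
--             crossedexpandedlines += 1
--     return crossedexpandedlines
-- ===== SOURCE B (Python) =====
-- def GetCrossedExpandedLines(pointA:(), pointB:(), insertedrow:[], insertedcolumns:[]):
--     def count_between(lo, hi, lines):
--         return len({x for x in lines if lo <= x < hi})
--     rows = count_between(min(pointA[0], pointB[0]), max(pointA[0], pointB[0]), insertedrow)
--     cols = count_between(min(pointA[1], pointB[1]), max(pointA[1], pointB[1]), insertedcolumns)
--     return rows + cols
-- ===== Notes on version B (the rewrite author's own statement) =====
-- stated objective: faster
-- what changed: Instead of scanning every integer v in the coordinate interval and rescanning the inserted-line list for each v, B filters each inserted-line list once to the values inside the interval and counts the distinct ones with a set.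
import Mathlib
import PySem

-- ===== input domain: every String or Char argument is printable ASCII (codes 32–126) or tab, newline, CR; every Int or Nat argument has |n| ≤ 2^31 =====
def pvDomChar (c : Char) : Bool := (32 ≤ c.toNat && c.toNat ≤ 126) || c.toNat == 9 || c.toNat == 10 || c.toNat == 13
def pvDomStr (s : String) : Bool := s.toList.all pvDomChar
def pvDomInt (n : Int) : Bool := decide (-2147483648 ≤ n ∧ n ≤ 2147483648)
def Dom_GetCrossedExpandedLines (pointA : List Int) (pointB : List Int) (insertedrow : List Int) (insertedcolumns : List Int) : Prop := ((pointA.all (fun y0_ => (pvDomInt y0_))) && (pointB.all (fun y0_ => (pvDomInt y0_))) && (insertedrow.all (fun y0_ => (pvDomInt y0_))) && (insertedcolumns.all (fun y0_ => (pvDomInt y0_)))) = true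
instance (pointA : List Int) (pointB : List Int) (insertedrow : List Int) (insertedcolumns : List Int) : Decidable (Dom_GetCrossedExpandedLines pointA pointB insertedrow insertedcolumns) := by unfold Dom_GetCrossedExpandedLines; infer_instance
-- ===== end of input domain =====

-- B replaces A's per-integer scan of the interval by a single filter-and-dedup of each
-- inserted-line list (objective: faster, asymptotic).

-- ===== PORT A =====
def GetCrossedExpandedLines (pointA : List Int) (pointB : List Int) (insertedrow : List Int) (insertedcolumns : List Int) : Int :=
  match PySem.List.pyGet? pointA 0, PySem.List.pyGet? pointB 0,
        PySem.List.pyGet? pointA 1, PySem.List.pyGet? pointB 1 with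
  | some a0, some b0, some a1, some b1 =>
      let rowrange := PySem.List.sorted [a0, b0] (fun x => x) false
      let columnrange := PySem.List.sorted [a1, b1] (fun x => x) false
      let c1 := (PySem.List.pyRange (PySem.List.pyGetD rowrange 0 0) (PySem.List.pyGetD rowrange 1 0) 1).foldl
          (fun acc v => if insertedrow.any (fun i => i == v) then acc + 1 else acc) (0 : Int)
      let c2 := (PySem.List.pyRange (PySem.List.pyGetD columnrange 0 0) (PySem.List.pyGetD columnrange 1 0) 1).foldl
          (fun acc v => if insertedcolumns.any (fun i => i == v) then acc + 1 else acc) c1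
      c2
  | _, _, _, _ => 0   -- unreachable under Pre_ (Python raises IndexError)

-- ===== PORT B =====
def pvCountBetween (lo hi : Int) (lines : List Int) : Int :=
  ((PySem.Set.ofList (lines.filter (fun x => decide (lo ≤ x) && decide (x < hi)))).length : Int)

def GetCrossedExpandedLines_alt (pointA : List Int) (pointB : List Int) (insertedrow : List Int) (insertedcolumns : List Int) : Int :=
  match PySem.List.pyGet? pointA 0 with
  | none => 0   -- unreachable under Pre_ (Python raises IndexError)
  | some a0 =>
    match PySem.List.pyGet? pointB 0 with
    | none => 0
    | some b0 =>
      match PySem.List.pyGet? pointA 1 with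
      | none => 0
      | some a1 =>
        match PySem.List.pyGet? pointB 1 with
        | none => 0
        | some b1 =>
          let rows := pvCountBetween (min a0 b0) (max a0 b0) insertedrow
          let cols := pvCountBetween (min a1 b1) (max a1 b1) insertedcolumns
          rows + cols

-- ===== PRECONDITION & SPEC =====
-- Pre_ excludes exactly the inputs where A raises IndexError (a point with fewer than 2 coordinates).
def Pre_GetCrossedExpandedLines (pointA : List Int) (pointB : List Int) (insertedrow : List Int) (insertedcolumns : List Int) : Prop :=
  2 ≤ pointA.length ∧ 2 ≤ pointB.length
instance (pointA : List Int) (pointB : List Int) (insertedrow : List Int) (insertedcolumns : List Int) : Decidable (Pre_GetCrossedExpandedLines pointA pointB insertedrow insertedcolumns) := by unfold Pre_GetCrossedExpandedLines; infer_instance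

def pvWitness_GetCrossedExpandedLines : List Int × List Int × List Int × List Int := ([0, 1], [5, 7], [2, 3], [4])

def Spec_GetCrossedExpandedLines (pointA : List Int) (pointB : List Int) (insertedrow : List Int) (insertedcolumns : List Int) (out : Int) : Prop := out = GetCrossedExpandedLines_alt pointA pointB insertedrow insertedcolumns
instance (pointA : List Int) (pointB : List Int) (insertedrow : List Int) (insertedcolumns : List Int) (out : Int) : Decidable (Spec_GetCrossedExpandedLines pointA pointB insertedrow insertedcolumns out) := by unfold Spec_GetCrossedExpandedLines; infer_instance

-- ===== CLAIM (what is proved, stated in full; the proofs are below) =====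
def Claim_equal_GetCrossedExpandedLines : Prop := ∀ (pointA : List Int) (pointB : List Int) (insertedrow : List Int) (insertedcolumns : List Int), Dom_GetCrossedExpandedLines pointA pointB insertedrow insertedcolumns → Pre_GetCrossedExpandedLines pointA pointB insertedrow insertedcolumns → Spec_GetCrossedExpandedLines pointA pointB insertedrow insertedcolumns (GetCrossedExpandedLines pointA pointB insertedrow insertedcolumns)

-- ===== LEMMAS AND PROOFS =====

-- sorted [a,b] is [min,max]
theorem pvSortedPair (a b : Int) : PySem.List.sorted [a, b] (fun x => x) false = [min a b, max a b] := by
  rcases le_total a b with h | h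
  · rw [min_eq_left h, max_eq_right h]
    apply PySem.List.sorted_id_eq_of_perm_of_pairwise
    · exact List.Perm.refl _
    · simp [List.pairwise_cons, h]
  · rw [min_eq_right h, max_eq_left h]
    apply PySem.List.sorted_id_eq_of_perm_of_pairwise
    · exact List.Perm.swap a b []
    · simp [List.pairwise_cons, h]

-- the counting fold is a countP
theorem pvFoldCount (L : List Int) (p : Int → Prop) [DecidablePred p] (c : Int) :
    L.foldl (fun acc v => if p v then acc + 1 else acc) c = c + (L.countP (fun v => decide (p v)) : Int) := by
  induction L generalizing c with
  | nil => simp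
  | cons x xs ih =>
      by_cases h : p x
      · simp [List.foldl_cons, h, ih]; ring
      · simp [List.foldl_cons, h, ih]

-- A's per-integer count over the interval equals B's distinct-in-interval count
theorem pvCountEq (lo hi : Int) (lines : List Int) :
    ((PySem.List.pyRange lo hi 1).countP (fun v => decide (v ∈ lines)) : Int)
      = pvCountBetween lo hi lines := by
  unfold pvCountBetween
  rw [List.countP_eq_length_filter]
  congr 1
  have hnd₁ : ((PySem.List.pyRange lo hi 1).filter (fun v => decide (v ∈ lines))).Nodup :=
    (PySem.List.nodup_pyRange_one lo hi).filter _
  have hnd₂ : (PySem.Set.ofList (lines.filter (fun x => decide (lo ≤ x) && decide (x < hi)))).Nodup :=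
    PySem.Set.nodup_ofList _
  refine List.Perm.length_eq ?_
  rw [List.perm_ext_iff_of_nodup hnd₁ hnd₂]
  intro v
  simp [List.mem_filter, PySem.List.mem_pyRange_one, PySem.Set.mem_ofList]
  tauto

-- ===== VERDICT (by name: the statement is the Claim_ definition above) =====
theorem GetCrossedExpandedLines_spec : Claim_equal_GetCrossedExpandedLines := by
  intro pointA pointB insertedrow insertedcolumns _ hpre
  obtain ⟨hA, hB⟩ := hpre
  rcases pointA with _ | ⟨a0, ta⟩; · simp at hA
  rcases ta with _ | ⟨a1, ta⟩; · simp at hA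
  rcases pointB with _ | ⟨b0, tb⟩; · simp at hB
  rcases tb with _ | ⟨b1, tb⟩; · simp at hB
  unfold Spec_GetCrossedExpandedLines GetCrossedExpandedLines GetCrossedExpandedLines_alt
  simp only [PySem.List.pyGet?, PySem.List.pyIdx?]
  norm_num
  rw [if_pos (by omega : (0:Int) ≤ (ta.length:Int)+1), if_pos (by omega : (0:Int) ≤ (tb.length:Int)+1)]
  simp only [Option.bind, List.getElem?_cons_zero]
  simp only [pvSortedPair]
  simp only [PySem.List.pyGetD, PySem.List.pyGet?, PySem.List.pyIdx?]
  norm_num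
  rw [pvFoldCount, pvFoldCount, pvCountEq, pvCountEq]
  ring
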